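-- pv_equiv track=rewrite | github.com/hahmad2205/Playground | weatherMan.py | calculate_max_temperature_year
-- ===== SOURCE A (Python) =====
-- def calculate_max_temperature_year(weather_record, date_abbr, max_temperature, max_temperature_date):
--     for weather_line in weather_record:
--         max_temperature_value = weather_line.get("Max TemperatureC")
--
--         if max_temperature_value:
--             current_temperature = int(max_temperature_value)
--             max_temperature = max(max_temperature, current_temperature)
--             max_temperature_date = weather_line[date_abbr] if current_temperature == int(max_temperature) else max_temperature_date
--     return max_temperature, max_temperature_date
-- ===== SOURCE B (Python) =====
-- def calculate_max_temperature_year(weather_record, date_abbr, max_temperature, max_temperature_date):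
--     final_max = max_temperature
--     for weather_line in weather_record:
--         value = weather_line.get("Max TemperatureC")
--         if value:
--             t = int(value)
--             if t > final_max:
--                 final_max = t
--     for weather_line in weather_record:
--         value = weather_line.get("Max TemperatureC")
--         if value and int(value) == final_max:
--             max_temperature_date = weather_line[date_abbr]
--     return final_max, max_temperature_date
-- ===== Notes on version B (the rewrite author's own statement) =====
-- stated objective: alternative
-- what changed: Replaces A's single fused scan that threads a running max and updates the date whenever the current temp reaches the running max with a compute-then-locate decomposition: one pass computes the final max (seeded by max_temperature), a second pass overwrites the date at every record whose temp equals that final max (last occurrence wins, seed date as fallback).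
-- outside the precondition, e.g. on calculate_max_temperature_year([{'Max TemperatureC': '1'}], 'PKT', 5, 'x'): A returns (5, 'x'), B returns (5, 'x')
import Mathlib
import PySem

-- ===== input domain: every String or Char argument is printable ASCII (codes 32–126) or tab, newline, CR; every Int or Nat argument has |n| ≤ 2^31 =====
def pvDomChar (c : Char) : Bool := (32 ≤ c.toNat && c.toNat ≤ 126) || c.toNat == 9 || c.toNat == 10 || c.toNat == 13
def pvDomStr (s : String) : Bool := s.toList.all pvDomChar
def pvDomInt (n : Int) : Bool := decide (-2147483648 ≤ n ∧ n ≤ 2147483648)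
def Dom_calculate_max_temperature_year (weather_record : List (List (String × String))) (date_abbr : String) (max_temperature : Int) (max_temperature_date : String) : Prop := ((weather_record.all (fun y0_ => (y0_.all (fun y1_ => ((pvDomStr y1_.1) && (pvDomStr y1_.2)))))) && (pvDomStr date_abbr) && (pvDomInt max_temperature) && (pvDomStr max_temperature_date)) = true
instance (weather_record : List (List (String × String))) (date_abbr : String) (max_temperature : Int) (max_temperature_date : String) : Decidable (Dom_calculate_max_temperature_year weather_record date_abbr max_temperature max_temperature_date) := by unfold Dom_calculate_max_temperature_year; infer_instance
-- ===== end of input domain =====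

-- ===== PORT A =====
-- B replaces A's fused running-max-and-date scan by a compute-the-max pass then a locate-the-date pass (alternative decomposition, same cost).
-- Mutation note: neither program mutates its arguments; equivalence is about the return value.
def calculate_max_temperature_year (weather_record : List (List (String × String))) (date_abbr : String) (max_temperature : Int) (max_temperature_date : String) : Int × String :=
  weather_record.foldl (fun st weather_line =>
    let max_temperature_value := List.lookup "Max TemperatureC" weather_line
    match max_temperature_value with
    | none => st
    | some v =>
      if v = "" then st
      else
        match PySem.Int.ofStr? v with    -- int(...): none = ValueError, excluded by Pre_
        | none => st
        | some current_temperature =>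
          let m := max st.1 current_temperature
          (m, if current_temperature = m
              then (List.lookup date_abbr weather_line).getD ""   -- weather_line[date_abbr]; missing key = KeyError, excluded by Pre_
              else st.2))
    (max_temperature, max_temperature_date)

-- ===== PORT B =====
def calculate_max_temperature_year_alt (weather_record : List (List (String × String))) (date_abbr : String) (max_temperature : Int) (max_temperature_date : String) : Int × String :=
  let final_max := weather_record.foldl (fun fm weather_line =>
    match List.lookup "Max TemperatureC" weather_line with
    | none => fm
    | some v =>
      if v = "" then fm
      else
        match PySem.Int.ofStr? v with
        | none => fm
        | some t => if t > fm then t else fm) max_temperature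
  let date := weather_record.foldl (fun d weather_line =>
    match List.lookup "Max TemperatureC" weather_line with
    | none => d
    | some v =>
      if v = "" then d
      else
        match PySem.Int.ofStr? v with
        | none => d
        | some t => if t = final_max then (List.lookup date_abbr weather_line).getD "" else d) max_temperature_date
  (final_max, date)

-- ===== PRECONDITION & SPEC =====
-- Pre_ excludes records whose truthy "Max TemperatureC" value is not int-parseable (A raises ValueError) and
-- records with a truthy temp but no date_abbr key (A raises KeyError when such a temp is a running max);
-- the key requirement is slightly wider than A's exact raising condition, see the cite in claim.json.
def Pre_calculate_max_temperature_year (weather_record : List (List (String × String))) (date_abbr : String) (max_temperature : Int) (max_temperature_date : String) : Prop :=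
  ∀ wl ∈ weather_record,
    ((List.lookup "Max TemperatureC" wl).all (fun v =>
      v == "" || ((PySem.Int.ofStr? v).isSome && (List.lookup date_abbr wl).isSome))) = true
instance (weather_record : List (List (String × String))) (date_abbr : String) (max_temperature : Int) (max_temperature_date : String) : Decidable (Pre_calculate_max_temperature_year weather_record date_abbr max_temperature max_temperature_date) := by unfold Pre_calculate_max_temperature_year; infer_instance
def pvWitness_calculate_max_temperature_year : (List (List (String × String))) × String × Int × String :=
  ([[("Max TemperatureC", "31"), ("PKT", "2006-6-1")], [("Max TemperatureC", ""), ("PKT", "2006-6-2")]], "PKT", 0, "")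

def Spec_calculate_max_temperature_year (weather_record : List (List (String × String))) (date_abbr : String) (max_temperature : Int) (max_temperature_date : String) (out : Int × String) : Prop := out = calculate_max_temperature_year_alt weather_record date_abbr max_temperature max_temperature_date
instance (weather_record : List (List (String × String))) (date_abbr : String) (max_temperature : Int) (max_temperature_date : String) (out : Int × String) : Decidable (Spec_calculate_max_temperature_year weather_record date_abbr max_temperature max_temperature_date out) := by unfold Spec_calculate_max_temperature_year; infer_instance

-- ===== CLAIM (what is proved, stated in full; the proofs are below) =====
def Claim_equal_calculate_max_temperature_year : Prop := ∀ (weather_record : List (List (String × String))) (date_abbr : String) (max_temperature : Int) (max_temperature_date : String), Dom_calculate_max_temperature_year weather_record date_abbr max_temperature max_temperature_date → Pre_calculate_max_temperature_year weather_record date_abbr max_temperature max_temperature_date → Spec_calculate_max_temperature_year weather_record date_abbr max_temperature max_temperature_date (calculate_max_temperature_year weather_record date_abbr max_temperature max_temperature_date)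

-- ===== LEMMAS AND PROOFS =====

-- the (truthy, parsed) temperature of a record, if any
def pvTemp (wl : List (String × String)) : Option Int :=
  match List.lookup "Max TemperatureC" wl with
  | none => none
  | some v => if v = "" then none else PySem.Int.ofStr? v

-- the date value A/B read from a record
def pvDate (date_abbr : String) (wl : List (String × String)) : String :=
  (List.lookup date_abbr wl).getD ""

def pvMaxF (rs : List (List (String × String))) (a : Int) : Int :=
  rs.foldl (fun fm wl => match pvTemp wl with
    | none => fm
    | some t => if t > fm then t else fm) a

def pvDateF (date_abbr : String) (M : Int) (rs : List (List (String × String))) (d : String) : String :=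
  rs.foldl (fun d wl => match pvTemp wl with
    | none => d
    | some t => if t = M then pvDate date_abbr wl else d) d

def pvFoldA (date_abbr : String) (rs : List (List (String × String))) (st : Int × String) : Int × String :=
  rs.foldl (fun st wl => match pvTemp wl with
    | none => st
    | some t => (max st.1 t, if t = max st.1 t then pvDate date_abbr wl else st.2)) st

theorem pvMaxF_cons (r : List (String × String)) (rs : List (List (String × String))) (a : Int) :
    pvMaxF (r :: rs) a =
      pvMaxF rs (match pvTemp r with | none => a | some t => if t > a then t else a) := rfl

theorem pvDateF_cons (da : String) (M : Int) (r : List (String × String))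
    (rs : List (List (String × String))) (d : String) :
    pvDateF da M (r :: rs) d =
      pvDateF da M rs (match pvTemp r with | none => d | some t => if t = M then pvDate da r else d) := rfl

theorem pvFoldA_cons (da : String) (r : List (String × String))
    (rs : List (List (String × String))) (st : Int × String) :
    pvFoldA da (r :: rs) st =
      pvFoldA da rs (match pvTemp r with
        | none => st
        | some t => (max st.1 t, if t = max st.1 t then pvDate da r else st.2)) := rfl

theorem pvFoldl_ext {α β : Type} (f g : β → α → β) (h : ∀ s x, f s x = g s x) :
    ∀ (l : List α) (s : β), List.foldl f s l = List.foldl g s l := by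
  intro l
  induction l with
  | nil => intro s; rfl
  | cons x xs ih => intro s; simp only [List.foldl_cons, h s x, ih]

theorem pvPortA_eq (rs : List (List (String × String))) (da : String) (m : Int) (d : String) :
    calculate_max_temperature_year rs da m d = pvFoldA da rs (m, d) := by
  unfold calculate_max_temperature_year pvFoldA
  apply pvFoldl_ext
  intro st wl
  simp only [pvTemp, pvDate]
  rcases List.lookup "Max TemperatureC" wl with _ | v
  · rfl
  · dsimp only
    split_ifs with h
    · rfl
    · rcases PySem.Int.ofStr? v with _ | t <;> rfl

theorem pvMaxF_eq_altmax (rs : List (List (String × String))) (m : Int) :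
    rs.foldl (fun fm weather_line =>
      match List.lookup "Max TemperatureC" weather_line with
      | none => fm
      | some v =>
        if v = "" then fm
        else
          match PySem.Int.ofStr? v with
          | none => fm
          | some t => if t > fm then t else fm) m = pvMaxF rs m := by
  unfold pvMaxF
  apply pvFoldl_ext
  intro fm wl
  simp only [pvTemp]
  rcases List.lookup "Max TemperatureC" wl with _ | v
  · rfl
  · dsimp only
    split_ifs with h
    · rfl
    · rcases PySem.Int.ofStr? v with _ | t <;> rfl

theorem pvPortB_eq (rs : List (List (String × String))) (da : String) (m : Int) (d : String) :
    calculate_max_temperature_year_alt rs da m d = (pvMaxF rs m, pvDateF da (pvMaxF rs m) rs d) := by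
  unfold calculate_max_temperature_year_alt
  dsimp only
  simp only [pvMaxF_eq_altmax]
  congr 1
  unfold pvDateF
  apply pvFoldl_ext
  intro dd wl
  simp only [pvTemp, pvDate]
  rcases List.lookup "Max TemperatureC" wl with _ | v
  · rfl
  · dsimp only
    split_ifs with h
    · rfl
    · rcases PySem.Int.ofStr? v with _ | t <;> rfl

theorem pvMaxF_le (rs : List (List (String × String))) (a : Int) : a ≤ pvMaxF rs a := by
  induction rs generalizing a with
  | nil => simp [pvMaxF]
  | cons r rs ih =>
    rw [pvMaxF_cons]
    rcases h : pvTemp r with _ | t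
    · exact ih a
    · dsimp only
      split_ifs with ht
      · exact le_trans (le_of_lt ht) (ih t)
      · exact ih a

theorem pvMaxF_mem (rs : List (List (String × String))) (a : Int) :
    pvMaxF rs a = a ∨ ∃ r ∈ rs, pvTemp r = some (pvMaxF rs a) := by
  induction rs generalizing a with
  | nil => left; rfl
  | cons r rs ih =>
    rw [pvMaxF_cons]
    rcases h : pvTemp r with _ | t
    · dsimp only
      rcases ih a with h1 | ⟨r', hr', ht'⟩
      · left; exact h1
      · right; exact ⟨r', List.mem_cons_of_mem _ hr', ht'⟩
    · dsimp only
      split_ifs with ht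
      · rcases ih t with h1 | ⟨r', hr', ht'⟩
        · right; exact ⟨r, List.mem_cons_self, by rw [h, h1]⟩
        · right; exact ⟨r', List.mem_cons_of_mem _ hr', ht'⟩
      · rcases ih a with h1 | ⟨r', hr', ht'⟩
        · left; exact h1
        · right; exact ⟨r', List.mem_cons_of_mem _ hr', ht'⟩

theorem pvDateF_indep (da : String) (M : Int) (rs : List (List (String × String)))
    (hex : ∃ r ∈ rs, pvTemp r = some M) (d1 d2 : String) :
    pvDateF da M rs d1 = pvDateF da M rs d2 := by
  induction rs generalizing d1 d2 with
  | nil => rcases hex with ⟨r, hr, _⟩; exact absurd hr List.not_mem_nil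
  | cons r rs ih =>
    rcases hex with ⟨r', hr', ht'⟩
    rcases List.mem_cons.mp hr' with rfl | hmem
    · rw [pvDateF_cons, pvDateF_cons da M r' rs d2, ht']
      dsimp only
      rw [if_pos rfl, if_pos rfl]
    · rw [pvDateF_cons, pvDateF_cons da M r rs d2]
      exact ih ⟨r', hmem, ht'⟩ _ _

theorem pvMain (da : String) (rs : List (List (String × String))) (m : Int) (d : String) :
    pvFoldA da rs (m, d) = (pvMaxF rs m, pvDateF da (pvMaxF rs m) rs d) := by
  induction rs generalizing m d with
  | nil => rfl
  | cons r rs ih =>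
    rw [pvFoldA_cons, pvMaxF_cons, pvDateF_cons]
    rcases h : pvTemp r with _ | t
    · exact ih m d
    · dsimp only
      have hstep : (if t > m then t else m) = max m t := by
        split_ifs with h1 <;> omega
      simp only [hstep]
      rw [ih]
      congr 1
      by_cases htM : t = pvMaxF rs (max m t)
      · have hmle : max m t ≤ pvMaxF rs (max m t) := pvMaxF_le rs (max m t)
        have hteq : t = max m t := by omega
        rw [if_pos hteq, if_pos htM]
      · rw [if_neg htM]
        by_cases hmt : t = max m t
        · rw [if_pos hmt]
          have hMne : pvMaxF rs (max m t) ≠ max m t := fun hc => htM (hmt.trans hc.symm)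
          rcases pvMaxF_mem rs (max m t) with h1 | hex
          · exact absurd h1 hMne
          · exact pvDateF_indep da _ rs hex _ _
        · rw [if_neg hmt]

-- ===== VERDICT (by name: the statement is the Claim_ definition above) =====
theorem calculate_max_temperature_year_spec : Claim_equal_calculate_max_temperature_year := by
  intro wr da mt mtd _ _
  unfold Spec_calculate_max_temperature_year
  rw [pvPortA_eq, pvPortB_eq, pvMain]
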